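-- pv_equiv track=rewrite | github.com/syedtaz/dsa | python/src/leetcode/1250-1499/1258.py | generateSentences
-- ===== SOURCE A (Python) =====
-- from typing import List
-- from itertools import product
--
-- class UnionFind:
--     parents: dict[str, str]
--     rank: dict[str, int]
--
--     def __init__(self, strings: list[str]) -> None:
--         self.parents = {s: s for s in strings}
--         self.ranks = {s: 0 for s in strings}
--
--     def find(self, x: str) -> str:
--         if self.parents[x] != x:
--             self.parents[x] = self.find(self.parents[x])
--         return self.parents[x]
--
--     def get_set(self, x: str) -> list[str]:
--         xbar = self.find(x)
--         return [y for y in self.parents if self.parents[y] == xbar]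
--
--     def union(self, x: str, y: str) -> None:
--         xbar = self.find(x)
--         ybar = self.find(y)
--
--         if xbar == ybar:
--             return None
--
--         if self.ranks[xbar] > self.ranks[ybar]:
--             self.parents[ybar] = xbar
--         else:
--             self.parents[xbar] = ybar
--             if self.ranks[xbar] == self.ranks[ybar]:
--                 self.ranks[ybar] += 1
--
-- def generateSentences(synonyms: List[List[str]], text: str) -> List[str]:
--     def define_set(word_list: list[list[str]]) -> UnionFind:
--         words: set[str] = set()
--
--         for xs in word_list:
--             words = words.union(set(xs))
--
--         return UnionFind(list(words))
--
--     uf = define_set(word_list=synonyms)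
--
--     for words in synonyms:
--         for a, b in zip(words, words[1:]):
--             uf.union(a, b)
--
--     # Force path compression
--     for i in uf.parents.keys():
--         _ = uf.find(i)
--
--     new_text = [
--         [x] if x not in uf.parents else uf.get_set(x) for x in text.split(" ")
--     ]
--     acc: list[str] = new_text[0]
--     for words in new_text[1:]:
--         res: list[str] = []
--         for a, b in product(acc, words):
--             res.append(f"{a} {b}")
--         acc = res
--
--     acc.sort()
--     return acc
-- ===== SOURCE B (Python) =====
-- from itertools import product
-- from typing import List
--
-- def generateSentences(synonyms: List[List[str]], text: str) -> List[str]: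
--     # Build an undirected word graph; synonym classes are its connected
--     # components, found by BFS -- no union-find at all.
--     adj: dict[str, list[str]] = {}
--     for ws in synonyms:
--         for w in ws:
--             if w not in adj:
--                 adj[w] = []
--         for a, b in zip(ws, ws[1:]):
--             adj[a].append(b)
--             adj[b].append(a)
--
--     def component(x: str) -> list[str]:
--         group = [x]
--         seen = {x}
--         i = 0
--         while i < len(group):
--             for nb in adj[group[i]]:
--                 if nb not in seen:
--                     group.append(nb)
--                     seen.add(nb)
--             i += 1
--         return group
--
--     options = [component(x) if x in adj else [x] for x in text.split(" ")]
--     return sorted(" ".join(t) for t in product(*options))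
-- ===== Notes on version B (the rewrite author's own statement) =====
-- stated objective: faster
-- what changed: B discards the union-find entirely: it builds an explicit undirected adjacency-list graph over the synonym words and computes each text word's synonym class as the connected component found by a BFS with a visited set, then takes itertools.product of the option lists instead of A's incremental pairwise product loop.
import Mathlib
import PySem

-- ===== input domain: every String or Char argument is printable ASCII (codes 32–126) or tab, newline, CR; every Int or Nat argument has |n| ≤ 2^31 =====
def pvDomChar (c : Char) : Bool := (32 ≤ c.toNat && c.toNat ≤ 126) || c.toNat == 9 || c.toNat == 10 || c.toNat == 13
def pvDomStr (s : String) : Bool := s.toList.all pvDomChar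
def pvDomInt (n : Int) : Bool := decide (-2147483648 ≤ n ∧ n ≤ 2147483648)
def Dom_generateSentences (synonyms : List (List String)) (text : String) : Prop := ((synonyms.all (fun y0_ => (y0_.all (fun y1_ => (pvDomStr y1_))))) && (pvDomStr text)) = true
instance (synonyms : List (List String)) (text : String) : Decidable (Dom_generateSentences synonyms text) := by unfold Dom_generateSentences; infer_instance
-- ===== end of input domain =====

-- B drops the union-find entirely: it builds an explicit undirected word graph and
-- finds each text word's synonym class as a BFS connected component.

-- ===== PORT A =====
-- UnionFind.find with path compression; `fuel` only makes the recursion structural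
-- (parent chains are shorter than the key count, so the 0 case is never reached in A's use;
--  self.parents[x] is ported as getD x x — the key is always present in A's use).
def ufFind : Nat → PySem.Dict String String → String → PySem.Dict String String × String
  | 0, p, x => (p, x)
  | f+1, p, x =>
    let px := p.getD x x
    if px = x then (p, x)
    else
      let r := ufFind f p px      -- self.parents[x] = self.find(self.parents[x])
      (r.1.insert x r.2, r.2)

-- UnionFind.union (the ranks dict is threaded alongside parents)
def ufUnion (p : PySem.Dict String String) (rk : PySem.Dict String Int) (x y : String) :
    PySem.Dict String String × PySem.Dict String Int :=
  let fx := ufFind p.items.length p x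
  let fy := ufFind fx.1.items.length fx.1 y
  let p1 := fy.1
  let xbar := fx.2
  let ybar := fy.2
  if xbar = ybar then (p1, rk)
  else if rk.getD ybar 0 < rk.getD xbar 0 then (p1.insert ybar xbar, rk)
  else
    (p1.insert xbar ybar,
     if rk.getD xbar 0 = rk.getD ybar 0 then rk.insert ybar (rk.getD ybar 0 + 1) else rk)

-- UnionFind.get_set
def ufGetSet (p : PySem.Dict String String) (x : String) :
    PySem.Dict String String × List String :=
  let f := ufFind p.items.length p x
  (f.1, f.1.keys.filter (fun y => f.1.getD y y == f.2))

def generateSentences (synonyms : List (List String)) (text : String) : List String :=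
  -- define_set: words = union of all synonym lists as a set.
  -- (list(words) iterates a Python set in hash order, which is not modelled; the returned
  --  value is independent of that order — everything is sorted at the end — so the Set's
  --  insertion order stands in for it.)
  let words := synonyms.foldl (fun s xs => PySem.Set.union s (PySem.Set.ofList xs)) PySem.Set.empty
  let parents := words.foldl (fun d s => d.insert s s) (PySem.Dict.empty : PySem.Dict String String)
  let ranks := words.foldl (fun d s => d.insert s (0 : Int)) (PySem.Dict.empty : PySem.Dict String Int)
  -- for words in synonyms: for a, b in zip(words, words[1:]): uf.union(a, b)
  let st := synonyms.foldl
    (fun st ws => (ws.zip ws.tail).foldl (fun st ab => ufUnion st.1 st.2 ab.1 ab.2) st)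
    (parents, ranks)
  -- force path compression
  let p := st.1.keys.foldl (fun p i => (ufFind p.items.length p i).1) st.1
  -- new_text comprehension (get_set mutates parents, so the dict is threaded through)
  let tw := (PySem.Str.split? text " ").getD []   -- sep " " ≠ "": split? never returns none
  let res := tw.foldl
    (fun (acc : PySem.Dict String String × List (List String)) x =>
      if acc.1.contains x = false then (acc.1, acc.2 ++ [[x]])
      else
        let g := ufGetSet acc.1 x
        (g.1, acc.2 ++ [g.2]))
    (p, ([] : List (List String)))
  let newText := res.2
  let acc0 := PySem.List.pyGetD newText 0 []      -- new_text[0] (split always returns ≥ 1 piece)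
  -- for words in new_text[1:]: res = [f"{a} {b}" for a, b in product(acc, words)]
  -- (the f-string "{a} {b}" is ported as " ".join([a, b]), the same string, kernel-reducible)
  let acc := (PySem.List.slice newText (some 1) none).foldl
    (fun acc ws =>
      acc.foldl (fun r a => ws.foldl (fun r b => r ++ [PySem.Str.join " " [a, b]]) r) [])
    acc0
  PySem.List.sorted acc (fun s => s) false

-- ===== PORT B =====
-- adj[a].append(b); adj[b].append(a)
def addEdge (adj : PySem.Dict String (List String)) (a b : String) :
    PySem.Dict String (List String) :=
  let adj := adj.insert a (adj.getD a [] ++ [b])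
  adj.insert b (adj.getD b [] ++ [a])

-- the adjacency dict of B's word graph: per synonym list, register the words, then both
-- directions of every consecutive pair
def adjOf (synonyms : List (List String)) : PySem.Dict String (List String) :=
  synonyms.foldl
    (fun adj ws =>
      (ws.zip ws.tail).foldl (fun adj ab => addEdge adj ab.1 ab.2)
        (ws.foldl (fun adj w => if adj.contains w then adj else adj.insert w []) adj))
    PySem.Dict.empty

-- B's BFS while-loop; `fuel` only makes it structural (the loop runs once per group
-- element and a group never exceeds the key count, so the 0 case is never reached in B's use)
def bfsGo (adj : PySem.Dict String (List String)) :
    Nat → List String → PySem.Set String → Nat → List String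
  | 0, group, _, _ => group
  | f+1, group, seen, i =>
    if i < group.length then
      let st := (adj.getD (group.getD i "") []).foldl
        (fun (st : List String × PySem.Set String) nb =>
          if st.2.contains nb then st else (st.1 ++ [nb], st.2.add nb)) (group, seen)
      bfsGo adj f st.1 st.2 (i+1)
    else group

-- component(x): BFS from x over adj
def component (adj : PySem.Dict String (List String)) (x : String) : List String :=
  bfsGo adj adj.items.length [x] (PySem.Set.ofList [x]) 0

def generateSentences_alt (synonyms : List (List String)) (text : String) : List String :=
  let adj := adjOf synonyms
  let options := ((PySem.Str.split? text " ").getD []).map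
    (fun x => if adj.contains x then component adj x else [x])
  -- itertools.product(*options), tuples as lists, built left to right
  let tuples := options.foldl
    (fun acc ws => acc.flatMap (fun t => ws.map (fun w => t ++ [w]))) [[]]
  PySem.List.sorted (tuples.map (fun t => PySem.Str.join " " t)) (fun s => s) false

-- ===== PRECONDITION & SPEC =====
def Spec_generateSentences (synonyms : List (List String)) (text : String) (out : List String) : Prop := out = generateSentences_alt synonyms text
instance (synonyms : List (List String)) (text : String) (out : List String) : Decidable (Spec_generateSentences synonyms text out) := by unfold Spec_generateSentences; infer_instance

-- ===== CLAIM (what is proved, stated in full; the proofs are below) =====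
def Claim_equal_generateSentences : Prop := ∀ (synonyms : List (List String)) (text : String), Dom_generateSentences synonyms text → Spec_generateSentences synonyms text (generateSentences synonyms text)

-- ===== LEMMAS AND PROOFS =====

-- ---------- A-side: parent-chain reachability of the union-find ----------

-- the parent function of A's dict (total form of self.parents[x], as in the port)
def ufPar (p : PySem.Dict String String) (x : String) : String := p.getD x x

-- x reaches root r in exactly n parent steps
inductive ReachN (p : PySem.Dict String String) : String → String → Nat → Prop
  | root {x} : ufPar p x = x → ReachN p x x 0
  | step {x r n} : ufPar p x ≠ x → ReachN p (ufPar p x) r n → ReachN p x r (n + 1)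

def Reaches (p : PySem.Dict String String) (x r : String) : Prop := ∃ n, ReachN p x r n

-- x and y lie in the same union-find class
def EqR (p : PySem.Dict String String) (x y : String) : Prop :=
  ∃ r, Reaches p x r ∧ Reaches p y r

def UFClosed (p : PySem.Dict String String) : Prop := ∀ x ∈ p.keys, ufPar p x ∈ p.keys
def UFTotal (p : PySem.Dict String String) : Prop := ∀ x, ∃ r n, ReachN p x r n
def UFWF (p : PySem.Dict String String) : Prop := p.keys.Nodup ∧ UFClosed p ∧ UFTotal p

theorem ufPar_of_not_mem (p : PySem.Dict String String) (x : String) (h : x ∉ p.keys) :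
    ufPar p x = x := by
  unfold ufPar
  rw [PySem.Dict.getD_of_not_contains]
  rw [← Bool.not_eq_true, PySem.Dict.contains_iff_mem_keys]
  exact h

theorem reachN_det {p : PySem.Dict String String} {x r s : String} {n m : Nat}
    (h1 : ReachN p x r n) (h2 : ReachN p x s m) : r = s ∧ n = m := by
  induction h1 generalizing m with
  | root hx => cases h2 with
    | root _ => exact ⟨rfl, rfl⟩
    | step hne _ => exact absurd hx hne
  | step hne _ ih => cases h2 with
    | root hx => exact absurd hx hne
    | step _ h2' => obtain ⟨he, hn⟩ := ih h2'; exact ⟨he, by omega⟩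

theorem reaches_det {p : PySem.Dict String String} {x r s : String}
    (h1 : Reaches p x r) (h2 : Reaches p x s) : r = s := by
  obtain ⟨n, h1⟩ := h1; obtain ⟨m, h2⟩ := h2; exact (reachN_det h1 h2).1

theorem reachN_root_fix {p : PySem.Dict String String} {x r : String} {n : Nat}
    (h : ReachN p x r n) : ufPar p r = r := by
  induction h with
  | root hx => exact hx
  | step _ _ ih => exact ih

theorem reaches_of_root {p : PySem.Dict String String} {x s : String}
    (hx : ufPar p x = x) (h : Reaches p x s) : s = x :=
  reaches_det h ⟨0, ReachN.root hx⟩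

theorem reaches_self_of_root {p : PySem.Dict String String} {x : String}
    (hx : ufPar p x = x) : Reaches p x x := ⟨0, ReachN.root hx⟩

theorem reachN_mem {p : PySem.Dict String String} {x r : String} {n : Nat}
    (hc : UFClosed p) (hx : x ∈ p.keys) (h : ReachN p x r n) : r ∈ p.keys := by
  induction h with
  | root _ => exact hx
  | step hne h ih => exact ih (hc _ hx)

theorem eqR_refl (p : PySem.Dict String String) (hT : UFTotal p) (x : String) : EqR p x x := by
  obtain ⟨r, n, h⟩ := hT x; exact ⟨r, ⟨n, h⟩, ⟨n, h⟩⟩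

theorem eqR_symm {p : PySem.Dict String String} {x y : String} (h : EqR p x y) : EqR p y x := by
  obtain ⟨r, h1, h2⟩ := h; exact ⟨r, h2, h1⟩

theorem eqR_trans {p : PySem.Dict String String} {x y z : String}
    (h1 : EqR p x y) (h2 : EqR p y z) : EqR p x z := by
  obtain ⟨r, hx, hy⟩ := h1; obtain ⟨s, hy', hz⟩ := h2
  exact ⟨r, hx, (reaches_det hy' hy) ▸ hz⟩

theorem eqR_iff_reaches {p : PySem.Dict String String} {x xr : String}
    (hx : Reaches p x xr) (a : String) : EqR p a x ↔ Reaches p a xr := by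
  constructor
  · rintro ⟨r, ha, hx'⟩; rw [reaches_det hx' hx] at ha; exact ha
  · intro h; exact ⟨xr, h, hx⟩

-- the nodes of a parent chain are distinct, so chains are short
theorem reachN_iterate {p : PySem.Dict String String} {x r : String} {n : Nat}
    (h : ReachN p x r n) : ∀ i ≤ n, ReachN p ((ufPar p)^[i] x) r (n - i) := by
  induction h with
  | root hx =>
    intro i hi; interval_cases i; simpa using ReachN.root hx
  | @step x r n hne hr ih =>
    intro i hi
    cases i with
    | zero => simpa using ReachN.step hne hr
    | succ j =>
      have := ih j (by omega)
      rw [Function.iterate_succ_apply]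
      simpa using this

theorem reachN_le_length {p : PySem.Dict String String} {x r : String} {n : Nat}
    (hwf : UFWF p) (h : ReachN p x r n) : n ≤ p.keys.length := by
  rcases Nat.eq_zero_or_pos n with h0 | hpos
  · omega
  · -- x is a key (its parent differs from it), and the n+1 chain nodes are distinct keys
    have hxk : x ∈ p.keys := by
      by_contra hx
      cases h with
      | root _ => omega
      | step hne _ => exact hne (ufPar_of_not_mem p x hx)
    have hchain : ∀ i ≤ n, (ufPar p)^[i] x ∈ p.keys := by
      intro i hi
      induction i with
      | zero => simpa using hxk
      | succ j ih =>
        rw [Function.iterate_succ_apply']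
        exact hwf.2.1 _ (ih (by omega))
    have hnodup : ((List.range (n + 1)).map (fun i => (ufPar p)^[i] x)).Nodup := by
      rw [List.nodup_map_iff_inj_on (List.nodup_range)]
      intro i hi j hj hij
      simp only [List.mem_range] at hi hj
      have h1 := reachN_iterate h i (by omega)
      have h2 := reachN_iterate h j (by omega)
      rw [hij] at h1
      have := (reachN_det h1 h2).2
      omega
    have hsub : ((List.range (n + 1)).map (fun i => (ufPar p)^[i] x)) ⊆ p.keys := by
      intro z hz
      simp only [List.mem_map, List.mem_range] at hz
      obtain ⟨i, hi, rfl⟩ := hz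
      exact hchain i (by omega)
    have := (List.subperm_of_subset hnodup hsub).length_le
    have h2 : n + 1 ≤ p.keys.length := by simpa using this
    omega

theorem ufPar_insert (p : PySem.Dict String String) (x r z : String) :
    ufPar (p.insert x r) z = if z = x then r else ufPar p z := by
  unfold ufPar
  rw [PySem.Dict.getD_insert]

-- path compression: rewriting x's parent straight to its root changes no reachability
theorem reaches_insert_iff {p : PySem.Dict String String} {x r : String}
    (hpx : ufPar p x ≠ x) (hxr : x ≠ r) (hxreach : Reaches p x r) (hroot : ufPar p r = r) :
    ∀ z s, Reaches (p.insert x r) z s ↔ Reaches p z s := by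
  have hqr : ufPar (p.insert x r) r = r := by
    rw [ufPar_insert, if_neg (Ne.symm hxr)]; exact hroot
  intro z s
  constructor
  · rintro ⟨n, h⟩
    induction h with
    | @root z hz =>
      rw [ufPar_insert] at hz
      by_cases hzx : z = x
      · rw [if_pos hzx] at hz
        exact absurd (hz.trans hzx).symm hxr
      · rw [if_neg hzx] at hz; exact ⟨0, ReachN.root hz⟩
    | @step z s n hz hrec ih =>
      by_cases hzx : z = x
      · rw [ufPar_insert, if_pos hzx] at hrec
        have hs : s = r := reaches_det ⟨n, hrec⟩ (reaches_self_of_root hqr)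
        rw [hzx, hs]; exact hxreach
      · rw [ufPar_insert, if_neg hzx] at hz hrec ih
        obtain ⟨m, hm⟩ := ih
        exact ⟨m + 1, ReachN.step hz hm⟩
  · rintro ⟨n, h⟩
    induction h with
    | @root z hz =>
      have hzx : z ≠ x := fun e => hpx (e ▸ hz)
      exact ⟨0, ReachN.root (by rw [ufPar_insert, if_neg hzx]; exact hz)⟩
    | @step z s n hz hrec ih =>
      by_cases hzx : z = x
      · have hs : s = r := reaches_det ⟨n + 1, ReachN.step hz hrec⟩ (hzx ▸ hxreach)
        have h1 : ufPar (p.insert x r) z = r := by rw [ufPar_insert, if_pos hzx]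
        obtain ⟨m, hm⟩ := reaches_self_of_root hqr
        refine ⟨m + 1, ?_⟩
        rw [hs]
        exact ReachN.step (by rw [h1]; exact fun e => hxr (hzx ▸ e.symm)) (by rw [h1]; exact hm)
      · obtain ⟨m, hm⟩ := ih
        exact ⟨m + 1, ReachN.step (by rw [ufPar_insert, if_neg hzx]; exact hz)
          (by rw [ufPar_insert, if_neg hzx]; exact hm)⟩

-- the find lemma: value, key list, closure, reachability, flat-node values, resulting parents of x and r
theorem find_spec {p : PySem.Dict String String} {x r : String} {n : Nat}
    (hwf : UFWF p) (h : ReachN p x r n) :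
    ∀ f, n ≤ f →
    (ufFind f p x).2 = r ∧
    (ufFind f p x).1.keys = p.keys ∧
    UFClosed (ufFind f p x).1 ∧
    (∀ z s, Reaches (ufFind f p x).1 z s ↔ Reaches p z s) ∧
    (∀ z, ufPar p (ufPar p z) = ufPar p z → ufPar (ufFind f p x).1 z = ufPar p z) ∧
    ufPar (ufFind f p x).1 x = r ∧ ufPar (ufFind f p x).1 r = r := by
  induction h with
  | @root x hx =>
    intro f _
    match f with
    | 0 => exact ⟨rfl, rfl, hwf.2.1, fun _ _ => Iff.rfl, fun _ _ => rfl, hx, hx⟩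
    | f + 1 =>
      have : ufFind (f + 1) p x = (p, x) := by
        simp only [ufFind]
        rw [show p.getD x x = ufPar p x from rfl, if_pos hx]
      rw [this]
      exact ⟨rfl, rfl, hwf.2.1, fun _ _ => Iff.rfl, fun _ _ => rfl, hx, hx⟩
  | @step x r n hpx hrec ih =>
    intro f hf
    match f with
    | 0 => omega
    | f + 1 =>
      have hxk : x ∈ p.keys := by
        by_contra hx; exact hpx (ufPar_of_not_mem p x hx)
      have heq : ufFind (f + 1) p x =
          ((ufFind f p (ufPar p x)).1.insert x (ufFind f p (ufPar p x)).2,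
           (ufFind f p (ufPar p x)).2) := by
        simp only [ufFind]
        rw [show p.getD x x = ufPar p x from rfl, if_neg hpx]
      obtain ⟨ih1, ih2, ih3, ih4, ih5, ih6, ih7⟩ := ih f (by omega)
      set p1 := (ufFind f p (ufPar p x)).1 with hp1
      rw [heq, ih1]
      have hxr : x ≠ r :=
        fun e => hpx (by rw [e]; exact reachN_root_fix hrec)
      have hxreach1 : Reaches p1 x r := (ih4 x r).mpr ⟨n + 1, ReachN.step hpx hrec⟩
      have hp1x : ufPar p1 x ≠ x := by
        intro e
        exact hxr (reaches_det ((ih4 x x).mp (reaches_self_of_root e))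
          (⟨n + 1, ReachN.step hpx hrec⟩ : Reaches p x r))
      have hrootp : ufPar p r = r := reachN_root_fix hrec
      have hr1 : ufPar p1 r = r := (ih5 r (by simp [hrootp])).trans hrootp
      have hiff := reaches_insert_iff hp1x hxr hxreach1 hr1
      have hcont : p1.contains x = true := by
        rw [PySem.Dict.contains_iff_mem_keys, ih2]; exact hxk
      refine ⟨rfl, ?_, ?_, ?_, ?_, ?_, ?_⟩
      · rw [PySem.Dict.keys_insert_of_contains _ _ hcont, ih2]
      · -- closure
        intro z hz
        rw [PySem.Dict.keys_insert_of_contains _ _ hcont] at hz ⊢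
        rw [ufPar_insert]
        by_cases hzx : z = x
        · rw [if_pos hzx, ih2]
          exact reachN_mem hwf.2.1 hxk (ReachN.step hpx hrec)
        · rw [if_neg hzx]
          exact ih3 z hz
      · intro z s
        rw [hiff z s]
        exact ih4 z s
      · -- flat nodes keep their parent value
        intro z hz
        rw [ufPar_insert]
        by_cases hzx : z = x
        · -- flat x: its parent is already a root, so the recursive find returns it
          have hz' : ufPar p (ufPar p x) = ufPar p x := by rw [← hzx]; exact hz
          have hdet := reachN_det hrec (ReachN.root hz')
          rw [if_pos hzx, ← hzx] at *
          rw [← hdet.1]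
        · rw [if_neg hzx]
          exact ih5 z hz
      · rw [ufPar_insert, if_pos rfl]
      · rw [ufPar_insert, if_neg (Ne.symm hxr)]
        exact hr1

theorem find_wf {p : PySem.Dict String String} {x r : String} {n : Nat} {f : Nat}
    (hwf : UFWF p) (h : ReachN p x r n) (hf : n ≤ f) : UFWF (ufFind f p x).1 := by
  obtain ⟨_, h2, h3, h4, _, _, _⟩ := find_spec hwf h f hf
  refine ⟨h2 ▸ hwf.1, h3, fun z => ?_⟩
  obtain ⟨s, m, hm⟩ := hwf.2.2 z
  obtain ⟨m', hm'⟩ := (h4 z s).mpr ⟨m, hm⟩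
  exact ⟨s, m', hm'⟩

-- linking root u under root v: reachability with u collapsed into v
theorem reaches_link_fwd {p : PySem.Dict String String} {u v : String}
    (hu : ufPar p u = u) (hv : ufPar p v = v) (huv : u ≠ v) :
    ∀ z s, Reaches p z s → Reaches (p.insert u v) z (if s = u then v else s) := by
  have hqv : ufPar (p.insert u v) v = v := by
    rw [ufPar_insert, if_neg (Ne.symm huv)]; exact hv
  rintro z s ⟨n, h⟩
  induction h with
  | @root z hz =>
    by_cases hzu : z = u
    · rw [if_pos hzu]
      refine ⟨1, ReachN.step ?_ ?_⟩
      · rw [ufPar_insert, if_pos hzu]; rw [hzu]; exact Ne.symm huv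
      · rw [ufPar_insert, if_pos hzu]; exact ReachN.root hqv
    · rw [if_neg hzu]
      exact ⟨0, ReachN.root (by rw [ufPar_insert, if_neg hzu]; exact hz)⟩
  | @step z s n hz hrec ih =>
    have hzu : z ≠ u := fun e => hz (e ▸ hu)
    obtain ⟨m, hm⟩ := ih
    exact ⟨m + 1, ReachN.step (by rw [ufPar_insert, if_neg hzu]; exact hz)
      (by rw [ufPar_insert, if_neg hzu]; exact hm)⟩

theorem reaches_link_bwd {p : PySem.Dict String String} {u v : String}
    (hu : ufPar p u = u) (hv : ufPar p v = v) (huv : u ≠ v) :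
    ∀ z s, Reaches (p.insert u v) z s →
      ∃ s₀, Reaches p z s₀ ∧ s = (if s₀ = u then v else s₀) := by
  have hqv : ufPar (p.insert u v) v = v := by
    rw [ufPar_insert, if_neg (Ne.symm huv)]; exact hv
  rintro z s ⟨n, h⟩
  induction h with
  | @root z hz =>
    rw [ufPar_insert] at hz
    by_cases hzu : z = u
    · rw [if_pos hzu] at hz; exact absurd (hz.trans hzu).symm huv
    · rw [if_neg hzu] at hz
      exact ⟨z, ⟨0, ReachN.root hz⟩, by rw [if_neg hzu]⟩
  | @step z s n hz hrec ih =>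
    by_cases hzu : z = u
    · have h1 : ufPar (p.insert u v) z = v := by rw [ufPar_insert, if_pos hzu]
      rw [h1] at hrec
      have hs : s = v := reaches_det ⟨n, hrec⟩ (reaches_self_of_root hqv)
      exact ⟨u, by rw [hzu]; exact reaches_self_of_root hu, by rw [if_pos rfl]; exact hs⟩
    · rw [ufPar_insert, if_neg hzu] at hz hrec ih
      obtain ⟨s₀, hs₀, hse⟩ := ih
      exact ⟨s₀, ⟨(hs₀.choose + 1 : Nat), ReachN.step hz hs₀.choose_spec⟩, hse⟩

-- class structure after linking u under v: the classes of u and v merge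
theorem eqR_link {p : PySem.Dict String String} {u v : String}
    (hu : ufPar p u = u) (hv : ufPar p v = v) (huv : u ≠ v) (a b : String) :
    EqR (p.insert u v) a b ↔
      (EqR p a b ∨ (Reaches p a u ∧ Reaches p b v) ∨ (Reaches p a v ∧ Reaches p b u)) := by
  constructor
  · rintro ⟨s, hra, hrb⟩
    obtain ⟨sa, hsa, hea⟩ := reaches_link_bwd hu hv huv a s hra
    obtain ⟨sb, hsb, heb⟩ := reaches_link_bwd hu hv huv b s hrb
    by_cases hau : sa = u <;> by_cases hbu : sb = u
    · left; exact ⟨u, hau ▸ hsa, hbu ▸ hsb⟩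
    · rw [if_pos hau] at hea; rw [if_neg hbu] at heb
      have hbv : sb = v := heb.symm.trans hea
      right; left; exact ⟨hau ▸ hsa, hbv ▸ hsb⟩
    · rw [if_neg hau] at hea; rw [if_pos hbu] at heb
      have hav : sa = v := hea.symm.trans heb
      right; right; exact ⟨hav ▸ hsa, hbu ▸ hsb⟩
    · rw [if_neg hau] at hea; rw [if_neg hbu] at heb
      have hbs : sb = sa := heb.symm.trans hea
      left; exact ⟨sa, hsa, hbs ▸ hsb⟩
  · intro h
    rcases h with ⟨s, hra, hrb⟩ | ⟨hra, hrb⟩ | ⟨hra, hrb⟩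
    · exact ⟨_, reaches_link_fwd hu hv huv a s hra, reaches_link_fwd hu hv huv b s hrb⟩
    · refine ⟨v, ?_, ?_⟩
      · have := reaches_link_fwd hu hv huv a u hra; rwa [if_pos rfl] at this
      · have := reaches_link_fwd hu hv huv b v hrb; rwa [if_neg (Ne.symm huv)] at this
    · refine ⟨v, ?_, ?_⟩
      · have := reaches_link_fwd hu hv huv a v hra; rwa [if_neg (Ne.symm huv)] at this
      · have := reaches_link_fwd hu hv huv b u hrb; rwa [if_pos rfl] at this

-- the union lemma: keys unchanged, well-formedness kept, classes of x and y joined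
theorem union_spec {p : PySem.Dict String String} (rk : PySem.Dict String Int) {x y : String}
    (hwf : UFWF p) (hx : x ∈ p.keys) (hy : y ∈ p.keys) :
    (ufUnion p rk x y).1.keys = p.keys ∧ UFWF (ufUnion p rk x y).1 ∧
    (∀ a b, EqR (ufUnion p rk x y).1 a b ↔
      (EqR p a b ∨ (EqR p a x ∧ EqR p b y) ∨ (EqR p a y ∧ EqR p b x))) := by
  obtain ⟨xr, nx, hxr⟩ := hwf.2.2 x
  have hlen : p.items.length = p.keys.length := by simp [PySem.Dict.keys]
  have hfx := find_spec hwf hxr p.items.length (by rw [hlen]; exact reachN_le_length hwf hxr)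
  have hwf1 : UFWF (ufFind p.items.length p x).1 := find_wf hwf hxr (by rw [hlen]; exact reachN_le_length hwf hxr)
  set p1 := (ufFind p.items.length p x).1 with hp1
  obtain ⟨yr, ny, hyr⟩ := hwf1.2.2 y
  have hlen1 : p1.items.length = p1.keys.length := by simp [PySem.Dict.keys]
  have hfy := find_spec hwf1 hyr p1.items.length (by rw [hlen1]; exact reachN_le_length hwf1 hyr)
  have hwf2 : UFWF (ufFind p1.items.length p1 y).1 := find_wf hwf1 hyr (by rw [hlen1]; exact reachN_le_length hwf1 hyr)
  set p2 := (ufFind p1.items.length p1 y).1 with hp2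
  -- facts about the two returned roots
  have hkeys1 : p1.keys = p.keys := hfx.2.1
  have hkeys2 : p2.keys = p.keys := hfy.2.1.trans hkeys1
  have hxbar : (ufFind p.items.length p x).2 = xr := hfx.1
  have hybar : (ufFind p1.items.length p1 y).2 = yr := hfy.1
  have hRx : Reaches p x xr := ⟨nx, hxr⟩
  have hRy1 : Reaches p1 y yr := ⟨ny, hyr⟩
  have hRy : Reaches p y yr := (hfx.2.2.2.1 y yr).mp hRy1
  have hxroot : ufPar p xr = xr := reachN_root_fix hxr
  have hyroot1 : ufPar p1 yr = yr := reachN_root_fix hyr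
  have hyroot : ufPar p yr = yr := by
    obtain ⟨m, hm'⟩ := (hfx.2.2.2.1 yr yr).mp (reaches_self_of_root hyroot1)
    exact reachN_root_fix hm'
  -- reachability in p2 is reachability in p
  have hR2 : ∀ z s, Reaches p2 z s ↔ Reaches p z s := by
    intro z s; rw [hfy.2.2.2.1 z s]; exact hfx.2.2.2.1 z s
  have hxroot2 : ufPar p2 xr = xr := by
    have h1 : ufPar p1 xr = xr := (hfx.2.2.2.2.1 xr (by simp [hxroot])).trans hxroot
    exact (hfy.2.2.2.2.1 xr (by simp [h1])).trans h1
  have hyroot2 : ufPar p2 yr = yr := hfy.2.2.2.2.2.2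
  have hxmem : xr ∈ p.keys := reachN_mem hwf.2.1 hx hxr
  have hymem : yr ∈ p.keys := by
    obtain ⟨m, hm⟩ := hRy; exact reachN_mem hwf.2.1 hy hm
  have hEqx : ∀ a, EqR p a x ↔ Reaches p a xr := eqR_iff_reaches hRx
  have hEqy : ∀ a, EqR p a y ↔ Reaches p a yr := eqR_iff_reaches hRy
  -- now the case split of union
  show (ufUnion p rk x y).1.keys = p.keys ∧ _ ∧ _
  rw [ufUnion]
  simp only [← hp1, ← hp2, hxbar, hybar]
  by_cases hxy : xr = yr
  · rw [if_pos hxy]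
    refine ⟨hkeys2, hwf2, fun a b => ?_⟩
    have : EqR p x y := ⟨xr, hRx, hxy ▸ hRy⟩
    constructor
    · intro h
      left
      obtain ⟨s, h1, h2⟩ := h
      exact ⟨s, (hR2 a s).mp h1, (hR2 b s).mp h2⟩
    · intro h
      rcases h with h | ⟨h1, h2⟩ | ⟨h1, h2⟩
      · obtain ⟨s, h1, h2⟩ := h; exact ⟨s, (hR2 a s).mpr h1, (hR2 b s).mpr h2⟩
      · exact ⟨xr, (hR2 a xr).mpr ((hEqx a).mp h1), (hR2 b xr).mpr (hxy ▸ (hEqy b).mp h2)⟩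
      · exact ⟨xr, (hR2 a xr).mpr (hxy ▸ (hEqy a).mp h1), (hR2 b xr).mpr ((hEqx b).mp h2)⟩
  · rw [if_neg hxy]
    -- both rank branches insert one root below the other; handle them uniformly
    have main : ∀ (u v : String), u ∈ p.keys → v ∈ p.keys →
        ufPar p2 u = u → ufPar p2 v = v → u ≠ v →
        ((u = xr ∧ v = yr) ∨ (u = yr ∧ v = xr)) →
        (p2.insert u v).keys = p.keys ∧ UFWF (p2.insert u v) ∧
        (∀ a b, EqR (p2.insert u v) a b ↔
          (EqR p a b ∨ (EqR p a x ∧ EqR p b y) ∨ (EqR p a y ∧ EqR p b x))) := by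
      intro u v humem hvmem hu hv huv hcase
      have hcontu : p2.contains u = true := by
        rw [PySem.Dict.contains_iff_mem_keys, hkeys2]; exact humem
      have hkeysq : (p2.insert u v).keys = p.keys := by
        rw [PySem.Dict.keys_insert_of_contains _ _ hcontu, hkeys2]
      refine ⟨hkeysq, ⟨hkeysq ▸ hwf.1, ?_, ?_⟩, ?_⟩
      · -- closure
        intro z hz
        rw [hkeysq] at hz ⊢
        rw [ufPar_insert]
        by_cases hzu : z = u
        · rw [if_pos hzu]; exact hvmem
        · rw [if_neg hzu]
          have := hwf2.2.1 z (by rwa [hkeys2])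
          rwa [hkeys2] at this
      · -- totality
        intro z
        obtain ⟨s, m, hm⟩ := hwf2.2.2 z
        obtain ⟨m', hm'⟩ := reaches_link_fwd hu hv huv z s ⟨m, hm⟩
        exact ⟨_, m', hm'⟩
      · intro a b
        rw [eqR_link hu hv huv a b]
        have trans1 : ∀ (c : String) (w : String), Reaches p2 c w ↔ Reaches p c w := hR2
        constructor
        · rintro (⟨s, h1, h2⟩ | ⟨h1, h2⟩ | ⟨h1, h2⟩)
          · left; exact ⟨s, (trans1 a s).mp h1, (trans1 b s).mp h2⟩
          · rcases hcase with ⟨rfl, rfl⟩ | ⟨rfl, rfl⟩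
            · right; left; exact ⟨(hEqx a).mpr ((trans1 a _).mp h1), (hEqy b).mpr ((trans1 b _).mp h2)⟩
            · right; right; exact ⟨(hEqy a).mpr ((trans1 a _).mp h1), (hEqx b).mpr ((trans1 b _).mp h2)⟩
          · rcases hcase with ⟨rfl, rfl⟩ | ⟨rfl, rfl⟩
            · right; right; exact ⟨(hEqy a).mpr ((trans1 a _).mp h1), (hEqx b).mpr ((trans1 b _).mp h2)⟩
            · right; left; exact ⟨(hEqx a).mpr ((trans1 a _).mp h1), (hEqy b).mpr ((trans1 b _).mp h2)⟩
        · rintro (⟨s, h1, h2⟩ | ⟨h1, h2⟩ | ⟨h1, h2⟩)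
          · left; exact ⟨s, (trans1 a s).mpr h1, (trans1 b s).mpr h2⟩
          · rcases hcase with ⟨rfl, rfl⟩ | ⟨rfl, rfl⟩
            · right; left; exact ⟨(trans1 a _).mpr ((hEqx a).mp h1), (trans1 b _).mpr ((hEqy b).mp h2)⟩
            · right; right; exact ⟨(trans1 a _).mpr ((hEqx a).mp h1), (trans1 b _).mpr ((hEqy b).mp h2)⟩
          · rcases hcase with ⟨rfl, rfl⟩ | ⟨rfl, rfl⟩
            · right; right; exact ⟨(trans1 a _).mpr ((hEqy a).mp h1), (trans1 b _).mpr ((hEqx b).mp h2)⟩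
            · right; left; exact ⟨(trans1 a _).mpr ((hEqy a).mp h1), (trans1 b _).mpr ((hEqx b).mp h2)⟩
    by_cases hrk : rk.getD yr 0 < rk.getD xr 0
    · rw [if_pos hrk]
      exact main yr xr hymem hxmem hyroot2 hxroot2 (Ne.symm hxy) (Or.inr ⟨rfl, rfl⟩)
    · rw [if_neg hrk]
      exact main xr yr hxmem hymem hxroot2 hyroot2 hxy (Or.inl ⟨rfl, rfl⟩)

def Compressed (p : PySem.Dict String String) : Prop :=
  ∀ z, ufPar p (ufPar p z) = ufPar p z

-- the "force path compression" loop
theorem compress_fold (L : List String) : ∀ p, UFWF p → (∀ x ∈ L, x ∈ p.keys) →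
    UFWF (L.foldl (fun p i => (ufFind p.items.length p i).1) p) ∧
    (L.foldl (fun p i => (ufFind p.items.length p i).1) p).keys = p.keys ∧
    (∀ z s, Reaches (L.foldl (fun p i => (ufFind p.items.length p i).1) p) z s ↔ Reaches p z s) ∧
    (∀ z, ufPar p (ufPar p z) = ufPar p z →
      ufPar (L.foldl (fun p i => (ufFind p.items.length p i).1) p) z = ufPar p z) ∧
    (∀ x ∈ L, ufPar (L.foldl (fun p i => (ufFind p.items.length p i).1) p)
      (ufPar (L.foldl (fun p i => (ufFind p.items.length p i).1) p) x) =
      ufPar (L.foldl (fun p i => (ufFind p.items.length p i).1) p) x) := by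
  induction L with
  | nil => intro p hwf _; exact ⟨hwf, rfl, fun _ _ => Iff.rfl, fun _ _ => rfl, by simp⟩
  | cons i L ih =>
    intro p hwf hmem
    obtain ⟨r, n, hr⟩ := hwf.2.2 i
    have hlen : p.items.length = p.keys.length := by simp [PySem.Dict.keys]
    have hb : n ≤ p.items.length := by rw [hlen]; exact reachN_le_length hwf hr
    have hf := find_spec hwf hr p.items.length hb
    have hwf' : UFWF (ufFind p.items.length p i).1 := find_wf hwf hr hb
    set p' := (ufFind p.items.length p i).1 with hp'
    have hmem' : ∀ x ∈ L, x ∈ p'.keys := fun x hx => hf.2.1 ▸ hmem x (by simp [hx])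
    obtain ⟨jh1, jh2, jh3, jh4, jh5⟩ := ih p' hwf' hmem'
    simp only [List.foldl_cons, ← hp']
    have hiflat' : ufPar p' (ufPar p' i) = ufPar p' i := by
      rw [hf.2.2.2.2.2.1, hf.2.2.2.2.2.2]
    refine ⟨jh1, jh2.trans hf.2.1, ?_, ?_, ?_⟩
    · intro z s; rw [jh3 z s]; exact hf.2.2.2.1 z s
    · intro z hz
      rw [jh4 z (by rw [hf.2.2.2.2.1 z hz, hf.2.2.2.2.1 (ufPar p z) (by simp [hz]), hz]),
          hf.2.2.2.2.1 z hz]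
    · intro x hx
      rcases List.mem_cons.mp hx with rfl | hx
      · rw [jh4 x hiflat', jh4 (ufPar p' x) (by rw [hiflat', hiflat'])]
        exact hiflat'
      · exact jh5 x hx

-- get_set on a fully compressed dict: parents untouched, the class read off by one filter
theorem getSet_spec {p : PySem.Dict String String} (hwf : UFWF p) (hcomp : Compressed p)
    (x : String) (hx : x ∈ p.keys) :
    (ufGetSet p x).2 = p.keys.filter (fun y => ufPar p y == ufPar p x) ∧
    (∀ z, ufPar (ufGetSet p x).1 z = ufPar p z) ∧
    (ufGetSet p x).1.keys = p.keys ∧ UFWF (ufGetSet p x).1 ∧ Compressed (ufGetSet p x).1 := by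
  have hr : ReachN p x (ufPar p x) (if ufPar p x = x then 0 else 1) := by
    by_cases hroot : ufPar p x = x
    · rw [if_pos hroot, hroot]; exact ReachN.root hroot
    · rw [if_neg hroot]; exact ReachN.step hroot (ReachN.root (hcomp x))
  have hlen : 1 ≤ p.items.length := by
    have : p.keys ≠ [] := fun h => by simp [h] at hx
    have : p.keys.length ≥ 1 := List.length_pos_iff.mpr this
    simpa [PySem.Dict.keys] using this
  have hf := find_spec hwf hr p.items.length (by split <;> omega)
  have hwf' := find_wf hwf hr (by split <;> omega)
  have hpar : ∀ z, ufPar (ufFind p.items.length p x).1 z = ufPar p z :=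
    fun z => hf.2.2.2.2.1 z (hcomp z)
  refine ⟨?_, ?_, ?_, ?_, ?_⟩
  · show (ufFind p.items.length p x).1.keys.filter _ = _
    rw [hf.2.1]
    refine List.filter_congr (fun y hy => ?_)
    show ((ufFind p.items.length p x).1.getD y y == (ufFind p.items.length p x).2) = _
    rw [hf.1, show (ufFind p.items.length p x).1.getD y y = ufPar (ufFind p.items.length p x).1 y from rfl, hpar y]
  · exact hpar
  · exact hf.2.1
  · exact hwf'
  · intro z
    show ufPar (ufFind p.items.length p x).1 (ufPar (ufFind p.items.length p x).1 z) =
      ufPar (ufFind p.items.length p x).1 z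
    rw [hpar, hpar]; exact hcomp z

-- ---------- initial state ----------

theorem words_spec (syns : List (List String)) :
    ∀ s : PySem.Set String, s.Nodup →
    (syns.foldl (fun s xs => PySem.Set.union s (PySem.Set.ofList xs)) s).Nodup ∧
    (∀ x, x ∈ syns.foldl (fun s xs => PySem.Set.union s (PySem.Set.ofList xs)) s ↔
      x ∈ s ∨ ∃ l ∈ syns, x ∈ l) := by
  induction syns with
  | nil => intro s hs; exact ⟨hs, by simp⟩
  | cons ws syns ih =>
    intro s hs
    rw [List.foldl_cons]
    obtain ⟨c1, c2⟩ := ih (PySem.Set.union s (PySem.Set.ofList ws)) (PySem.Set.nodup_union _ _ hs)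
    refine ⟨c1, fun x => ?_⟩
    rw [c2 x, PySem.Set.mem_union, PySem.Set.mem_ofList]
    simp only [List.mem_cons]
    constructor
    · rintro ((h | h) | ⟨l, hl, hx⟩)
      · exact Or.inl h
      · exact Or.inr ⟨ws, Or.inl rfl, h⟩
      · exact Or.inr ⟨l, Or.inr hl, hx⟩
    · rintro (h | ⟨l, (rfl | hl), hx⟩)
      · exact Or.inl (Or.inl h)
      · exact Or.inl (Or.inr hx)
      · exact Or.inr ⟨l, hl, hx⟩

theorem get?_foldl_insert_id (words : List String)
    (d : PySem.Dict String String) (u : String) :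
    (words.foldl (fun d s => d.insert s s) d).get? u =
      if u ∈ words then some u else d.get? u := by
  induction words generalizing d with
  | nil => simp
  | cons w ws ih =>
    rw [List.foldl_cons, ih]
    by_cases hu : u ∈ ws
    · rw [if_pos hu, if_pos (by simp [hu])]
    · rw [if_neg hu]
      by_cases huw : u = w
      · rw [if_pos (by simp [huw]), huw, PySem.Dict.get?_insert_self]
      · rw [if_neg (by simp [hu, huw]), PySem.Dict.get?_insert_of_ne _ _ huw]

theorem parents0_spec (words : List String) (hnd : words.Nodup) :
    (words.foldl (fun d s => d.insert s s) (PySem.Dict.empty : PySem.Dict String String)).keys = words ∧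
    (∀ z, ufPar (words.foldl (fun d s => d.insert s s) (PySem.Dict.empty : PySem.Dict String String)) z = z) := by
  constructor
  · rw [PySem.Dict.keys_foldl_insert]
    rw [PySem.Dict.keys_empty]
    show PySem.Set.update [] words = words
    rw [PySem.Set.update_nil_left]
    exact PySem.Set.ofList_eq_self_of_nodup _ hnd
  · intro z
    show ((words.foldl (fun d s => d.insert s s) PySem.Dict.empty).get? z).getD z = z
    rw [get?_foldl_insert_id]
    split <;> simp [PySem.Dict.get?]
    rfl

-- ---------- endgame characterisations of A's compressed union-find ----------

theorem reaches_par {p : PySem.Dict String String} (hcomp : Compressed p) (z : String) :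
    Reaches p z (ufPar p z) := by
  by_cases h : ufPar p z = z
  · rw [h]; exact reaches_self_of_root h
  · exact ⟨1, ReachN.step h (ReachN.root (hcomp z))⟩

theorem eqR_iff_par {p : PySem.Dict String String} (hcomp : Compressed p) (x y : String) :
    EqR p x y ↔ ufPar p x = ufPar p y := by
  constructor
  · rintro ⟨r, h1, h2⟩
    rw [← reaches_det h1 (reaches_par hcomp x), ← reaches_det h2 (reaches_par hcomp y)]
  · intro h
    exact ⟨ufPar p x, reaches_par hcomp x, h ▸ reaches_par hcomp y⟩

theorem compressed_of_fold {p : PySem.Dict String String} (hwf : UFWF p) :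
    UFWF (p.keys.foldl (fun p i => (ufFind p.items.length p i).1) p) ∧
    (p.keys.foldl (fun p i => (ufFind p.items.length p i).1) p).keys = p.keys ∧
    (∀ z s, Reaches (p.keys.foldl (fun p i => (ufFind p.items.length p i).1) p) z s ↔ Reaches p z s) ∧
    Compressed (p.keys.foldl (fun p i => (ufFind p.items.length p i).1) p) := by
  obtain ⟨c1, c2, c3, c4, c5⟩ := compress_fold p.keys p hwf (fun x hx => hx)
  refine ⟨c1, c2, c3, ?_⟩
  intro z
  by_cases hz : z ∈ p.keys
  · exact c5 z hz
  · have : z ∉ (p.keys.foldl (fun p i => (ufFind p.items.length p i).1) p).keys := by rwa [c2]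
    have hr := ufPar_of_not_mem _ z this
    rw [hr, hr]

-- A's option list for one text word (after full compression)
def oA (p : PySem.Dict String String) (x : String) : List String :=
  if x ∈ p.keys then p.keys.filter (fun y => ufPar p y == ufPar p x) else [x]

-- B's option list for one text word
def oB (adj : PySem.Dict String (List String)) (x : String) : List String :=
  if adj.contains x then component adj x else [x]

theorem oA_congr {p p' : PySem.Dict String String} (hkeys : p'.keys = p.keys)
    (hpar : ∀ z, ufPar p' z = ufPar p z) (x : String) : oA p' x = oA p x := by
  rw [oA, oA, hkeys]
  by_cases hx : x ∈ p.keys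
  · rw [if_pos hx, if_pos hx]
    exact List.filter_congr (fun y _ => by rw [hpar y, hpar x])
  · rw [if_neg hx, if_neg hx]

theorem textFold_spec (tw : List String) :
    ∀ (p : PySem.Dict String String) (acc : List (List String)), UFWF p → Compressed p →
    (tw.foldl (fun (acc : PySem.Dict String String × List (List String)) x =>
        if acc.1.contains x = false then (acc.1, acc.2 ++ [[x]])
        else
          let g := ufGetSet acc.1 x
          (g.1, acc.2 ++ [g.2])) (p, acc)).2 = acc ++ tw.map (oA p) := by
  induction tw with
  | nil => intro p acc _ _; simp
  | cons x tw ih =>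
    intro p acc hwf hcomp
    rw [List.foldl_cons]
    by_cases hx : x ∈ p.keys
    · have hcont : p.contains x = true := by rw [PySem.Dict.contains_iff_mem_keys]; exact hx
      rw [if_neg (by rw [hcont]; simp)]
      obtain ⟨g2, gpar, gkeys, gwf, gcomp⟩ := getSet_spec hwf hcomp x hx
      simp only
      rw [ih (ufGetSet p x).1 (acc ++ [(ufGetSet p x).2]) gwf gcomp]
      rw [g2]
      have : tw.map (oA (ufGetSet p x).1) = tw.map (oA p) :=
        List.map_congr_left (fun a _ => oA_congr gkeys gpar a)
      rw [this, List.map_cons, oA, if_pos hx]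
      simp
    · have hcont : p.contains x = false := by
        rw [← Bool.not_eq_true, PySem.Dict.contains_iff_mem_keys]; exact hx
      rw [if_pos (by rw [hcont])]
      rw [ih p (acc ++ [[x]]) hwf hcomp, List.map_cons, oA, if_neg hx]
      simp

-- ---------- text.split(" ") is never empty ----------

theorem splitOn_go_ne_nil (sep : List Char) :
    ∀ (fuel : Nat) (l cur : List Char) (acc : List (List Char)),
    PySem.Chars.splitOn.go sep fuel l cur acc ≠ [] := by
  intro fuel
  induction fuel with
  | zero => intro l cur acc; simp [PySem.Chars.splitOn.go]
  | succ f ih =>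
    intro l cur acc
    cases l with
    | nil => simp [PySem.Chars.splitOn.go]
    | cons c rest =>
      rw [PySem.Chars.splitOn.go]
      split
      · exact ih _ _ _
      · exact ih _ _ _

theorem split_some (text : String) :
    ∃ l, PySem.Str.split? text " " = some l ∧ l ≠ [] := by
  have h := PySem.Str.split?_map text " "
  cases hs : PySem.Str.split? text " " with
  | none =>
    rw [hs] at h
    rw [PySem.Chars.split?] at h
    simp at h
  | some l =>
    refine ⟨l, rfl, fun he => ?_⟩
    rw [hs, he] at h
    rw [PySem.Chars.split?] at h
    simp [PySem.Chars.splitOn] at h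
    exact splitOn_go_ne_nil _ _ _ _ _ h

-- ---------- joining sentences ----------

theorem chars_join_snoc (sep c : List Char) :
    ∀ (l : List (List Char)), l ≠ [] →
    PySem.Chars.join sep (l ++ [c]) = PySem.Chars.join sep l ++ sep ++ c := by
  intro l
  induction l with
  | nil => intro h; exact absurd rfl h
  | cons x rest ih =>
    intro _
    cases rest with
    | nil =>
      show PySem.Chars.join sep (x :: [c]) = _
      rw [PySem.Chars.join_cons_cons, PySem.Chars.join_singleton, PySem.Chars.join_singleton]
    | cons y rest2 =>
      show PySem.Chars.join sep (x :: ((y :: rest2) ++ [c])) = _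
      rw [show (y :: rest2) ++ [c] = y :: (rest2 ++ [c]) from rfl]
      rw [PySem.Chars.join_cons_cons]
      rw [show (y :: (rest2 ++ [c])) = (y :: rest2) ++ [c] from rfl]
      rw [ih (by simp), PySem.Chars.join_cons_cons]
      simp [List.append_assoc]

theorem str_join_singleton (a : String) : PySem.Str.join " " [a] = a := by
  rw [← String.toList_inj, PySem.Str.toList_join]
  simp [PySem.Chars.join_singleton]

theorem str_join_snoc (t : List String) (ht : t ≠ []) (w : String) :
    PySem.Str.join " " (t ++ [w]) = PySem.Str.join " " [PySem.Str.join " " t, w] := by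
  rw [← String.toList_inj, PySem.Str.toList_join, PySem.Str.toList_join]
  simp only [List.map_append, List.map_cons, List.map_nil, PySem.Str.toList_join]
  rw [chars_join_snoc _ _ _ (by simpa using ht)]
  rw [PySem.Chars.join_cons_cons, PySem.Chars.join_singleton]

-- ---------- the cartesian product of the options ----------

theorem tupProd_perm :
    ∀ {opts1 opts2 : List (List String)}, List.Forall₂ List.Perm opts1 opts2 →
    ∀ (init1 init2 : List (List String)), init1.Perm init2 →
    (opts1.foldl (fun acc ws => acc.flatMap (fun t => ws.map (fun w => t ++ [w]))) init1).Perm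
    (opts2.foldl (fun acc ws => acc.flatMap (fun t => ws.map (fun w => t ++ [w]))) init2) := by
  intro opts1 opts2 h
  induction h with
  | nil => intro i1 i2 hi; simpa using hi
  | @cons ws1 ws2 o1 o2 hws htail ih =>
    intro i1 i2 hi
    rw [List.foldl_cons, List.foldl_cons]
    exact ih _ _ (List.Perm.flatMap hi (fun a _ => hws.map (fun w => a ++ [w])))

-- A's incremental sentence fold is the mapped join of the tuple product
theorem sentFold_spec :
    ∀ (opts : List (List String)) (ts : List (List String)), (∀ t ∈ ts, t ≠ []) →
    opts.foldl (fun acc ws =>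
        acc.foldl (fun r a => ws.foldl (fun r b => r ++ [PySem.Str.join " " [a, b]]) r) [])
      (ts.map (PySem.Str.join " "))
    = (opts.foldl (fun acc ws => acc.flatMap (fun t => ws.map (fun w => t ++ [w]))) ts).map
        (PySem.Str.join " ") := by
  intro opts
  induction opts with
  | nil => intro ts _; simp
  | cons ws opts ih =>
    intro ts hne
    rw [List.foldl_cons, List.foldl_cons]
    have inner : ∀ (r : List String) (a : String),
        ws.foldl (fun r b => r ++ [PySem.Str.join " " [a, b]]) r
          = r ++ ws.map (fun b => PySem.Str.join " " [a, b]) :=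
      fun r a => PySem.List.foldl_append_singleton_eq_map _ ws r
    have houter : (ts.map (PySem.Str.join " ")).foldl
        (fun r a => ws.foldl (fun r b => r ++ [PySem.Str.join " " [a, b]]) r) []
        = (ts.flatMap (fun t => ws.map (fun w => t ++ [w]))).map (PySem.Str.join " ") := by
      calc (ts.map (PySem.Str.join " ")).foldl
            (fun r a => ws.foldl (fun r b => r ++ [PySem.Str.join " " [a, b]]) r) []
          = (ts.map (PySem.Str.join " ")).foldl
            (fun r a => r ++ ws.map (fun b => PySem.Str.join " " [a, b])) [] := by
            have hf : (fun (r : List String) (a : String) =>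
                ws.foldl (fun r b => r ++ [PySem.Str.join " " [a, b]]) r)
                = fun r a => r ++ ws.map (fun b => PySem.Str.join " " [a, b]) :=
              funext fun r => funext fun a => inner r a
            rw [hf]
        _ = (ts.map (PySem.Str.join " ")).flatMap
              (fun a => ws.map (fun b => PySem.Str.join " " [a, b])) := by
            rw [PySem.List.foldl_append_eq_flatMap]
            simp
        _ = ts.flatMap (fun t => ws.map (fun b => PySem.Str.join " " [PySem.Str.join " " t, b])) := by
            rw [List.flatMap_map]
        _ = (ts.flatMap (fun t => ws.map (fun w => t ++ [w]))).map (PySem.Str.join " ") := by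
            rw [List.map_flatMap]
            refine List.flatMap_congr (fun t ht => ?_)
            rw [List.map_map]
            exact List.map_congr_left (fun w _ => (str_join_snoc t (hne t ht) w).symm)
    rw [houter]
    rw [ih _ (fun t ht => by
      rw [List.mem_flatMap] at ht
      obtain ⟨t0, _, ht⟩ := ht
      rw [List.mem_map] at ht
      obtain ⟨w, _, rfl⟩ := ht
      simp)]

theorem forall₂_perm_map (l : List String) (f g : String → List String)
    (h : ∀ x ∈ l, (f x).Perm (g x)) : List.Forall₂ List.Perm (l.map f) (l.map g) := by
  induction l with
  | nil => simp
  | cons x l ih =>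
    rw [List.map_cons, List.map_cons]
    exact List.Forall₂.cons (h x (by simp)) (ih (fun y hy => h y (by simp [hy])))

theorem singletons_map_join (o : List String) :
    ((o.map (fun w => [w])).map (PySem.Str.join " ")) = o := by
  rw [List.map_map]
  have : ∀ x ∈ o, (PySem.Str.join " " ∘ fun w => [w]) x = id x :=
    fun x _ => str_join_singleton x
  rw [List.map_congr_left this, List.map_id]

-- ---------- B-side: the synonym-pair edge relation and its equivalence closure ----------

def prsOf (synonyms : List (List String)) : List (String × String) :=
  synonyms.flatMap (fun ws => ws.zip ws.tail)

def EdgeIn (prs : List (String × String)) (u v : String) : Prop :=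
  (u, v) ∈ prs ∨ (v, u) ∈ prs

theorem edgeIn_symm {prs : List (String × String)} {u v : String}
    (h : EdgeIn prs u v) : EdgeIn prs v u := h.symm

theorem pair_eq_iff (u v : String) (ab : String × String) :
    (u, v) = ab ↔ u = ab.1 ∧ v = ab.2 := by
  simp [Prod.ext_iff]

-- A's nested union loop is the flat loop over all consecutive pairs
theorem foldl_nested {σ : Type} (f : σ → String × String → σ) (synonyms : List (List String)) :
    ∀ init : σ,
    synonyms.foldl (fun st ws => (ws.zip ws.tail).foldl f st) init
      = (prsOf synonyms).foldl f init := by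
  induction synonyms with
  | nil => intro init; rfl
  | cons ws rest ih =>
    intro init
    rw [List.foldl_cons, ih]
    simp [prsOf, List.foldl_append]

theorem eqvGen_mono_once {P Q : String → String → Prop}
    (h : ∀ u v, P u v → Relation.EqvGen Q u v) :
    ∀ a b, Relation.EqvGen P a b → Relation.EqvGen Q a b := by
  intro a b hab
  induction hab with
  | rel x y hxy => exact h x y hxy
  | refl x => exact Relation.EqvGen.refl x
  | symm x y _ ih => exact Relation.EqvGen.symm x y ih
  | trans x y z _ _ ih1 ih2 => exact Relation.EqvGen.trans x y z ih1 ih2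

-- the union-find classes after A's union loop are the equivalence closure of the pair edges
theorem eqR_foldPairs (prs : List (String × String)) :
    ∀ (p : PySem.Dict String String) (rk : PySem.Dict String Int),
    UFWF p → (∀ pr ∈ prs, pr.1 ∈ p.keys ∧ pr.2 ∈ p.keys) →
    (prs.foldl (fun st ab => ufUnion st.1 st.2 ab.1 ab.2) (p, rk)).1.keys = p.keys ∧
    UFWF (prs.foldl (fun st ab => ufUnion st.1 st.2 ab.1 ab.2) (p, rk)).1 ∧
    (∀ a b, EqR (prs.foldl (fun st ab => ufUnion st.1 st.2 ab.1 ab.2) (p, rk)).1 a b ↔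
      Relation.EqvGen (fun u v => EqR p u v ∨ EdgeIn prs u v) a b) := by
  induction prs with
  | nil =>
    intro p rk hwf _
    refine ⟨rfl, hwf, fun a b => ?_⟩
    have hequiv : Equivalence (fun u v => EqR p u v ∨ EdgeIn ([] : List (String × String)) u v) := by
      refine ⟨fun x => Or.inl (eqR_refl p hwf.2.2 x), ?_, ?_⟩
      · rintro x y (h | h)
        · exact Or.inl (eqR_symm h)
        · rcases h with h | h <;> simp at h
      · rintro x y z (h1 | h1) (h2 | h2)
        · exact Or.inl (eqR_trans h1 h2)
        · rcases h2 with h | h <;> simp at h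
        · rcases h1 with h | h <;> simp at h
        · rcases h1 with h | h <;> simp at h
    rw [Equivalence.eqvGen_iff hequiv]
    simp only [List.foldl_nil]
    constructor
    · exact fun h => Or.inl h
    · rintro (h | h)
      · exact h
      · rcases h with h | h <;> simp at h
  | cons ab rest ih =>
    intro p rk hwf hmem
    have hU := union_spec rk hwf (hmem ab (by simp)).1 (hmem ab (by simp)).2
    obtain ⟨hk1, hwf1, hjoin⟩ := hU
    obtain ⟨c1, c2, c3⟩ := ih (ufUnion p rk ab.1 ab.2).1 (ufUnion p rk ab.1 ab.2).2 hwf1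
      (fun pr hpr => by rw [hk1]; exact hmem pr (by simp [hpr]))
    rw [List.foldl_cons]
    refine ⟨c1.trans hk1, c2, fun a b => ?_⟩
    rw [c3 a b]
    have hedge : EdgeIn (ab :: rest) ab.1 ab.2 := Or.inl (by simp)
    constructor
    · apply eqvGen_mono_once
      rintro u v (h | h)
      · rw [hjoin u v] at h
        rcases h with h | ⟨h1, h2⟩ | ⟨h1, h2⟩
        · exact .rel u v (Or.inl h)
        · exact .trans u ab.1 v (.rel _ _ (Or.inl h1))
            (.trans ab.1 ab.2 v (.rel _ _ (Or.inr hedge))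
              (.symm _ _ (.rel v ab.2 (Or.inl h2))))
        · exact .trans u ab.2 v (.rel _ _ (Or.inl h1))
            (.trans ab.2 ab.1 v (.symm _ _ (.rel _ _ (Or.inr hedge)))
              (.symm _ _ (.rel v ab.1 (Or.inl h2))))
      · refine .rel u v (Or.inr ?_)
        rcases h with h | h
        · exact Or.inl (List.mem_cons_of_mem _ h)
        · exact Or.inr (List.mem_cons_of_mem _ h)
    · apply eqvGen_mono_once
      rintro u v (h | h)
      · exact .rel u v (Or.inl ((hjoin u v).mpr (Or.inl h)))
      · rcases h with h | h
        · rcases List.mem_cons.mp h with he | hr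
          · obtain ⟨hu, hv⟩ := (pair_eq_iff u v ab).mp he
            subst hu; subst hv
            exact .rel _ _ (Or.inl ((hjoin _ _).mpr (Or.inr (Or.inl
              ⟨eqR_refl p hwf.2.2 _, eqR_refl p hwf.2.2 _⟩))))
          · exact .rel u v (Or.inr (Or.inl hr))
        · rcases List.mem_cons.mp h with he | hr
          · obtain ⟨hv, hu⟩ := (pair_eq_iff v u ab).mp he
            subst hu; subst hv
            exact .rel _ _ (Or.inl ((hjoin _ _).mpr (Or.inr (Or.inr
              ⟨eqR_refl p hwf.2.2 _, eqR_refl p hwf.2.2 _⟩))))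
          · exact .rel u v (Or.inr (Or.inr hr))

-- ---------- B-side: the adjacency dict describes exactly the pair edges ----------

theorem contains_insert_iff {ν : Type} (d : PySem.Dict String ν) (k u : String) (v : ν) :
    (d.insert k v).contains u = true ↔ u = k ∨ d.contains u = true := by
  rw [PySem.Dict.contains_eq_isSome_get?, PySem.Dict.contains_eq_isSome_get?,
      PySem.Dict.get?_insert]
  split
  · simp_all
  · simp_all

theorem addEdge_spec (adj : PySem.Dict String (List String)) (a b : String) :
    (∀ u, (addEdge adj a b).contains u = true ↔ adj.contains u = true ∨ u = a ∨ u = b) ∧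
    (∀ u v, v ∈ (addEdge adj a b).getD u [] ↔
      v ∈ adj.getD u [] ∨ (u = a ∧ v = b) ∨ (u = b ∧ v = a)) := by
  refine ⟨?_, ?_⟩
  · intro u
    simp only [addEdge]
    rw [contains_insert_iff, contains_insert_iff]
    tauto
  · intro u v
    simp only [addEdge]
    rw [PySem.Dict.getD_insert]
    by_cases hub : u = b
    · rw [if_pos hub, PySem.Dict.getD_insert]
      by_cases hba : b = a
      · rw [if_pos hba]
        subst hub; subst hba
        simp only [List.mem_append, List.mem_singleton]
        tauto
      · rw [if_neg hba]
        subst hub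
        simp only [List.mem_append, List.mem_singleton]
        tauto
    · rw [if_neg hub, PySem.Dict.getD_insert]
      by_cases hua : u = a
      · rw [if_pos hua]
        subst hua
        simp only [List.mem_append, List.mem_singleton]
        tauto
      · rw [if_neg hua]
        tauto

theorem reg_spec (ws : List String) :
    ∀ adj : PySem.Dict String (List String),
    (∀ u, (ws.foldl (fun adj w => if adj.contains w then adj else adj.insert w []) adj).contains u = true
        ↔ adj.contains u = true ∨ u ∈ ws) ∧
    (∀ u v, v ∈ (ws.foldl (fun adj w => if adj.contains w then adj else adj.insert w []) adj).getD u []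
        ↔ v ∈ adj.getD u []) := by
  induction ws with
  | nil => intro adj; exact ⟨fun u => by simp, fun u v => Iff.rfl⟩
  | cons w ws ih =>
    intro adj
    simp only [List.foldl_cons]
    by_cases hc : adj.contains w = true
    · rw [if_pos hc]
      obtain ⟨i1, i2⟩ := ih adj
      refine ⟨fun u => ?_, i2⟩
      rw [i1 u]
      constructor
      · rintro (h | h)
        · exact Or.inl h
        · exact Or.inr (by simp [h])
      · rintro (h | h)
        · exact Or.inl h
        · rcases List.mem_cons.mp h with rfl | h
          · exact Or.inl hc
          · exact Or.inr h
    · rw [if_neg hc]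
      rw [Bool.not_eq_true] at hc
      obtain ⟨i1, i2⟩ := ih (adj.insert w [])
      refine ⟨fun u => ?_, fun u v => ?_⟩
      · rw [i1 u, contains_insert_iff]
        constructor
        · rintro ((rfl | h) | h)
          · exact Or.inr (by simp)
          · exact Or.inl h
          · exact Or.inr (by simp [h])
        · rintro (h | h)
          · exact Or.inl (Or.inr h)
          · rcases List.mem_cons.mp h with rfl | h
            · exact Or.inl (Or.inl rfl)
            · exact Or.inr h
      · rw [i2 u v, PySem.Dict.getD_insert]
        split
        · next he =>
          subst he
          rw [PySem.Dict.getD_of_not_contains _ _ hc]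
        · exact Iff.rfl

theorem edges_spec (pairs : List (String × String)) :
    ∀ adj : PySem.Dict String (List String),
    (∀ u, (pairs.foldl (fun adj ab => addEdge adj ab.1 ab.2) adj).contains u = true
        ↔ adj.contains u = true ∨ ∃ pr ∈ pairs, u = pr.1 ∨ u = pr.2) ∧
    (∀ u v, v ∈ (pairs.foldl (fun adj ab => addEdge adj ab.1 ab.2) adj).getD u []
        ↔ v ∈ adj.getD u [] ∨ EdgeIn pairs u v) := by
  induction pairs with
  | nil => intro adj; exact ⟨fun u => by simp, fun u v => by simp [EdgeIn]⟩
  | cons ab pairs ih =>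
    intro adj
    obtain ⟨a1, a2⟩ := addEdge_spec adj ab.1 ab.2
    obtain ⟨i1, i2⟩ := ih (addEdge adj ab.1 ab.2)
    simp only [List.foldl_cons]
    refine ⟨fun u => ?_, fun u v => ?_⟩
    · rw [i1 u, a1 u]
      simp only [List.mem_cons]
      constructor
      · rintro ((h | h | h) | ⟨pr, hpr, hh⟩)
        · exact Or.inl h
        · exact Or.inr ⟨ab, Or.inl rfl, Or.inl h⟩
        · exact Or.inr ⟨ab, Or.inl rfl, Or.inr h⟩
        · exact Or.inr ⟨pr, Or.inr hpr, hh⟩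
      · rintro (h | ⟨pr, (rfl | hpr), hh⟩)
        · exact Or.inl (Or.inl h)
        · rcases hh with rfl | rfl
          · exact Or.inl (Or.inr (Or.inl rfl))
          · exact Or.inl (Or.inr (Or.inr rfl))
        · exact Or.inr ⟨pr, hpr, hh⟩
    · rw [i2 u v, a2 u v]
      simp only [EdgeIn, List.mem_cons, pair_eq_iff]
      tauto

theorem edgeIn_cons (ws : List String) (rest : List (List String)) (u v : String) :
    EdgeIn (prsOf (ws :: rest)) u v ↔
      EdgeIn (ws.zip ws.tail) u v ∨ EdgeIn (prsOf rest) u v := by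
  simp only [EdgeIn, prsOf, List.flatMap_cons, List.mem_append]
  tauto

theorem zip_mem_both {ws : List String} {pr : String × String}
    (h : pr ∈ ws.zip ws.tail) : pr.1 ∈ ws ∧ pr.2 ∈ ws := by
  obtain ⟨a, b⟩ := pr
  obtain ⟨h1, h2⟩ := List.of_mem_zip h
  exact ⟨h1, List.mem_of_mem_tail h2⟩

theorem adjFold_spec (synonyms : List (List String)) :
    ∀ adj : PySem.Dict String (List String),
    (∀ u, (synonyms.foldl
        (fun adj ws => (ws.zip ws.tail).foldl (fun adj ab => addEdge adj ab.1 ab.2)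
          (ws.foldl (fun adj w => if adj.contains w then adj else adj.insert w []) adj)) adj).contains u = true
      ↔ adj.contains u = true ∨ ∃ l ∈ synonyms, u ∈ l) ∧
    (∀ u v, v ∈ (synonyms.foldl
        (fun adj ws => (ws.zip ws.tail).foldl (fun adj ab => addEdge adj ab.1 ab.2)
          (ws.foldl (fun adj w => if adj.contains w then adj else adj.insert w []) adj)) adj).getD u []
      ↔ v ∈ adj.getD u [] ∨ EdgeIn (prsOf synonyms) u v) := by
  induction synonyms with
  | nil =>
    intro adj
    exact ⟨fun u => by simp, fun u v => by simp [prsOf, EdgeIn]⟩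
  | cons ws rest ih =>
    intro adj
    obtain ⟨r1, r2⟩ := reg_spec ws adj
    obtain ⟨e1, e2⟩ := edges_spec (ws.zip ws.tail)
      (ws.foldl (fun adj w => if adj.contains w then adj else adj.insert w []) adj)
    obtain ⟨i1, i2⟩ := ih ((ws.zip ws.tail).foldl (fun adj ab => addEdge adj ab.1 ab.2)
      (ws.foldl (fun adj w => if adj.contains w then adj else adj.insert w []) adj))
    simp only [List.foldl_cons]
    refine ⟨fun u => ?_, fun u v => ?_⟩
    · rw [i1 u, e1 u, r1 u]
      simp only [List.mem_cons]
      constructor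
      · rintro (((h | h) | ⟨pr, hpr, hh⟩) | ⟨l, hl, hu⟩)
        · exact Or.inl h
        · exact Or.inr ⟨ws, Or.inl rfl, h⟩
        · refine Or.inr ⟨ws, Or.inl rfl, ?_⟩
          obtain ⟨hm1, hm2⟩ := zip_mem_both hpr
          rcases hh with rfl | rfl
          · exact hm1
          · exact hm2
        · exact Or.inr ⟨l, Or.inr hl, hu⟩
      · rintro (h | ⟨l, (rfl | hl), hu⟩)
        · exact Or.inl (Or.inl (Or.inl h))
        · exact Or.inl (Or.inl (Or.inr hu))
        · exact Or.inr ⟨l, hl, hu⟩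
    · rw [i2 u v, e2 u v, r2 u v, edgeIn_cons]
      tauto

theorem adj_spec (synonyms : List (List String)) :
    (∀ u, (adjOf synonyms).contains u = true ↔ ∃ l ∈ synonyms, u ∈ l) ∧
    (∀ u v, v ∈ (adjOf synonyms).getD u [] ↔ EdgeIn (prsOf synonyms) u v) := by
  obtain ⟨h1, h2⟩ := adjFold_spec synonyms PySem.Dict.empty
  have hce : ∀ u, (PySem.Dict.empty : PySem.Dict String (List String)).contains u = false := by
    intro u
    rw [← Bool.not_eq_true, PySem.Dict.contains_eq_isSome_get?, PySem.Dict.get?_empty]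
    simp
  have hge : ∀ u, (PySem.Dict.empty : PySem.Dict String (List String)).getD u [] = [] := by
    intro u
    rw [PySem.Dict.getD_of_not_contains _ _ (hce u)]
  refine ⟨fun u => ?_, fun u v => ?_⟩
  · simp only [adjOf]
    rw [h1 u, hce u]
    simp
  · simp only [adjOf]
    rw [h2 u v, hge u]
    simp

-- edge endpoints are synonym words
theorem edge_word {synonyms : List (List String)} {u v : String}
    (h : EdgeIn (prsOf synonyms) u v) :
    (∃ l ∈ synonyms, u ∈ l) ∧ (∃ l ∈ synonyms, v ∈ l) := by
  rcases h with h | h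
  · rw [prsOf, List.mem_flatMap] at h
    obtain ⟨ws, hws, hmem⟩ := h
    obtain ⟨h1, h2⟩ := zip_mem_both hmem
    exact ⟨⟨ws, hws, h1⟩, ⟨ws, hws, h2⟩⟩
  · rw [prsOf, List.mem_flatMap] at h
    obtain ⟨ws, hws, hmem⟩ := h
    obtain ⟨h1, h2⟩ := zip_mem_both hmem
    exact ⟨⟨ws, hws, h2⟩, ⟨ws, hws, h1⟩⟩

theorem conn_word {synonyms : List (List String)} :
    ∀ a b, Relation.EqvGen (EdgeIn (prsOf synonyms)) a b →
      ((∃ l ∈ synonyms, a ∈ l) ↔ (∃ l ∈ synonyms, b ∈ l)) := by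
  intro a b h
  induction h with
  | rel u v huv =>
    obtain ⟨h1, h2⟩ := edge_word huv
    exact iff_of_true h1 h2
  | refl u => exact Iff.rfl
  | symm _ _ _ ih => exact ih.symm
  | trans _ _ _ _ _ ih1 ih2 => exact ih1.trans ih2

-- ---------- B-side: BFS computes the equivalence class ----------

-- a group closed under adjacency contains exactly the class of anything in it
theorem closed_mem_iff {prs : List (String × String)} {adj : PySem.Dict String (List String)}
    (hadjE : ∀ u v, v ∈ adj.getD u [] ↔ EdgeIn prs u v)
    {group : List String}
    (hclosed : ∀ j, j < group.length → ∀ v, v ∈ adj.getD (group.getD j "") [] → v ∈ group) :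
    ∀ a b, Relation.EqvGen (EdgeIn prs) a b → (a ∈ group ↔ b ∈ group) := by
  have hstep : ∀ a b, EdgeIn prs a b → a ∈ group → b ∈ group := by
    intro a b hab ha
    obtain ⟨j, hj, he⟩ := List.getElem_of_mem ha
    refine hclosed j hj b ?_
    rw [List.getD_eq_getElem _ _ hj, he]
    exact (hadjE a b).mpr hab
  intro a b h
  induction h with
  | rel u v huv => exact ⟨hstep u v huv, hstep v u (edgeIn_symm huv)⟩
  | refl u => exact Iff.rfl
  | symm _ _ _ ih => exact ih.symm
  | trans _ _ _ _ _ ih1 ih2 => exact ih1.trans ih2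

theorem bfs_done {prs : List (String × String)} {adj : PySem.Dict String (List String)}
    (hadjE : ∀ u v, v ∈ adj.getD u [] ↔ EdgeIn prs u v)
    {x : String} {group : List String}
    (hconn : ∀ y ∈ group, Relation.EqvGen (EdgeIn prs) x y)
    (hx : x ∈ group)
    (hclosed : ∀ j, j < group.length → ∀ v, v ∈ adj.getD (group.getD j "") [] → v ∈ group) :
    ∀ y, y ∈ group ↔ Relation.EqvGen (EdgeIn prs) x y := by
  intro y
  constructor
  · exact fun h => hconn y h
  · intro h
    exact (closed_mem_iff hadjE hclosed x y h).mp hx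

-- one pass over the neighbour list of the current node
theorem bfs_step (nbs : List String) :
    ∀ (c : List String) (s : PySem.Set String),
    (∀ y, y ∈ s ↔ y ∈ c) → c.Nodup →
    ∃ extra : List String,
      (nbs.foldl (fun (st : List String × PySem.Set String) nb =>
        if st.2.contains nb then st else (st.1 ++ [nb], st.2.add nb)) (c, s)).1 = c ++ extra ∧
      (∀ y, y ∈ (nbs.foldl (fun (st : List String × PySem.Set String) nb =>
        if st.2.contains nb then st else (st.1 ++ [nb], st.2.add nb)) (c, s)).2 ↔ y ∈ c ++ extra) ∧
      (c ++ extra).Nodup ∧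
      (∀ y ∈ extra, y ∈ nbs) ∧
      (∀ v ∈ nbs, v ∈ c ++ extra) := by
  induction nbs with
  | nil =>
    intro c s hs hnd
    exact ⟨[], by simp, fun y => by simpa using hs y, by simpa using hnd, by simp, by simp⟩
  | cons nb nbs ih =>
    intro c s hs hnd
    simp only [List.foldl_cons]
    by_cases hc : s.contains nb = true
    · rw [if_pos hc]
      obtain ⟨extra, e1, e2, e3, e4, e5⟩ := ih c s hs hnd
      have hnbc : nb ∈ c := (hs nb).mp (List.contains_iff_mem.mp hc)
      refine ⟨extra, e1, e2, e3, fun y hy => List.mem_cons_of_mem _ (e4 y hy), fun v hv => ?_⟩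
      rcases List.mem_cons.mp hv with rfl | hv
      · exact List.mem_append_left _ hnbc
      · exact e5 v hv
    · rw [if_neg hc]
      have hnbc : nb ∉ c := fun h => hc (List.contains_iff_mem.mpr ((hs nb).mpr h))
      have hs' : ∀ y, y ∈ s.add nb ↔ y ∈ c ++ [nb] := by
        intro y; rw [PySem.Set.mem_add]; simp [hs y]
      have hnd' : (c ++ [nb]).Nodup := by
        rw [List.nodup_append]
        refine ⟨hnd, List.nodup_singleton nb, ?_⟩
        intro a ha b hb
        rw [List.mem_singleton] at hb
        subst hb
        exact fun e => hnbc (e ▸ ha)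
      obtain ⟨extra, e1, e2, e3, e4, e5⟩ := ih (c ++ [nb]) (s.add nb) hs' hnd'
      refine ⟨nb :: extra, ?_, ?_, ?_, ?_, ?_⟩
      · rw [e1]; simp
      · intro y; rw [e2 y]; simp
      · simpa using e3
      · intro y hy
        rcases List.mem_cons.mp hy with rfl | h
        · simp
        · exact List.mem_cons_of_mem _ (e4 y h)
      · intro v hv
        rcases List.mem_cons.mp hv with rfl | hv
        · simp
        · have := e5 v hv; simpa using this

theorem bfsGo_spec (adj : PySem.Dict String (List String)) (prs : List (String × String))
    (hadjE : ∀ u v, v ∈ adj.getD u [] ↔ EdgeIn prs u v)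
    (hadjC : ∀ u v, EdgeIn prs u v → v ∈ adj.keys)
    (x : String) :
    ∀ (fuel : Nat) (group : List String) (seen : PySem.Set String) (i : Nat),
    (∀ y, y ∈ seen ↔ y ∈ group) → group.Nodup → i ≤ group.length →
    (∀ y ∈ group, Relation.EqvGen (EdgeIn prs) x y) →
    x ∈ group →
    (∀ y ∈ group, y ∈ adj.keys) →
    (∀ j, j < i → ∀ v, v ∈ adj.getD (group.getD j "") [] → v ∈ group) →
    adj.keys.length ≤ fuel + i →
    (bfsGo adj fuel group seen i).Nodup ∧
    (∀ y, y ∈ bfsGo adj fuel group seen i ↔ Relation.EqvGen (EdgeIn prs) x y) := by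
  intro fuel
  induction fuel with
  | zero =>
    intro group seen i hseen hnd hi hconn hx hsub hclosed hfuel
    have hlen : group.length ≤ adj.keys.length :=
      (List.subperm_of_subset hnd (fun y hy => hsub y hy)).length_le
    have hieq : i = group.length := by omega
    rw [show bfsGo adj 0 group seen i = group from rfl]
    exact ⟨hnd, bfs_done hadjE hconn hx (fun j hj v hv => hclosed j (by omega) v hv)⟩
  | succ f ih =>
    intro group seen i hseen hnd hi hconn hx hsub hclosed hfuel
    by_cases hil : i < group.length
    · have hgi : group.getD i "" ∈ group := by
        rw [List.getD_eq_getElem _ _ hil]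
        exact List.getElem_mem _
      obtain ⟨extra, e1, e2, e3, e4, e5⟩ :=
        bfs_step (adj.getD (group.getD i "") []) group seen hseen hnd
      have heq : bfsGo adj (f+1) group seen i =
          bfsGo adj f
            ((adj.getD (group.getD i "") []).foldl
              (fun (st : List String × PySem.Set String) nb =>
                if st.2.contains nb then st else (st.1 ++ [nb], st.2.add nb)) (group, seen)).1
            ((adj.getD (group.getD i "") []).foldl
              (fun (st : List String × PySem.Set String) nb =>
                if st.2.contains nb then st else (st.1 ++ [nb], st.2.add nb)) (group, seen)).2
            (i+1) := by
        simp only [bfsGo]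
        rw [if_pos hil]
      rw [heq, e1]
      have hextra : ∀ y ∈ extra, EdgeIn prs (group.getD i "") y := by
        intro y hy
        exact (hadjE _ y).mp (e4 y hy)
      apply ih
      · intro y; exact e2 y
      · exact e3
      · have := List.length_append (as := group) (bs := extra)
        omega
      · intro y hy
        rcases List.mem_append.mp hy with hy | hy
        · exact hconn y hy
        · exact Relation.EqvGen.trans x (group.getD i "") y (hconn _ hgi)
            (Relation.EqvGen.rel _ _ (hextra y hy))
      · exact List.mem_append_left _ hx
      · intro y hy
        rcases List.mem_append.mp hy with hy | hy
        · exact hsub y hy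
        · exact hadjC _ y (hextra y hy)
      · intro j hj v hv
        rw [List.getD_append _ _ _ j (by omega)] at hv
        rcases Nat.lt_or_ge j i with hji | hji
        · exact List.mem_append_left _ (hclosed j hji v hv)
        · have hji' : j = i := by omega
          subst hji'
          exact e5 v hv
      · omega
    · have heq : bfsGo adj (f+1) group seen i = group := by
        simp only [bfsGo]
        rw [if_neg hil]
      rw [heq]
      have hieq : i = group.length := by omega
      exact ⟨hnd, bfs_done hadjE hconn hx (fun j hj v hv => hclosed j (by omega) v hv)⟩

theorem component_spec (synonyms : List (List String)) (x : String)
    (hx : x ∈ (adjOf synonyms).keys) :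
    (component (adjOf synonyms) x).Nodup ∧
    (∀ y, y ∈ component (adjOf synonyms) x ↔
      Relation.EqvGen (EdgeIn (prsOf synonyms)) x y) := by
  obtain ⟨h1, h2⟩ := adj_spec synonyms
  have hadjC : ∀ u v, EdgeIn (prsOf synonyms) u v → v ∈ (adjOf synonyms).keys := by
    intro u v h
    rw [← PySem.Dict.contains_iff_mem_keys, h1]
    exact (edge_word h).2
  show (bfsGo (adjOf synonyms) (adjOf synonyms).items.length [x] (PySem.Set.ofList [x]) 0).Nodup ∧ _
  apply bfsGo_spec (adjOf synonyms) (prsOf synonyms) h2 hadjC x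
  · intro y
    rw [PySem.Set.mem_ofList]
  · exact List.nodup_singleton x
  · simp
  · intro y hy
    have he : y = x := List.mem_singleton.mp hy
    subst he
    exact Relation.EqvGen.refl y
  · simp
  · intro y hy
    have he : y = x := List.mem_singleton.mp hy
    subst he
    exact hx
  · intro j hj v hv
    omega
  · simp [PySem.Dict.keys]

-- ===== VERDICT (by name: the statement is the Claim_ definition above) =====
theorem generateSentences_spec : Claim_equal_generateSentences := by
  intro synonyms text _
  show generateSentences synonyms text = generateSentences_alt synonyms text
  obtain ⟨tw, htw, htwne⟩ := split_some text
  set words := synonyms.foldl (fun s xs => PySem.Set.union s (PySem.Set.ofList xs))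
    PySem.Set.empty with hwordsdef
  obtain ⟨hwnd, hwmem⟩ := words_spec synonyms PySem.Set.empty (by simp [PySem.Set.empty])
  obtain ⟨hkeys0, hpar0⟩ := parents0_spec words hwnd
  set p0 := words.foldl (fun d s => d.insert s s)
    (PySem.Dict.empty : PySem.Dict String String) with hp0def
  set rk0 := words.foldl (fun d s => d.insert s (0 : Int))
    (PySem.Dict.empty : PySem.Dict String Int) with hrk0def
  have hwf0 : UFWF p0 := ⟨hkeys0 ▸ hwnd, fun x hx => by rw [hpar0]; exact hx,
    fun z => ⟨z, 0, ReachN.root (hpar0 z)⟩⟩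
  have hword_keys : ∀ u, u ∈ p0.keys ↔ ∃ l ∈ synonyms, u ∈ l := by
    intro u
    rw [hkeys0, hwmem u]
    simp [PySem.Set.empty]
  have hprs : ∀ pr ∈ prsOf synonyms, pr.1 ∈ p0.keys ∧ pr.2 ∈ p0.keys := by
    intro pr hpr
    rw [prsOf, List.mem_flatMap] at hpr
    obtain ⟨ws, hws, hmem⟩ := hpr
    obtain ⟨h1, h2⟩ := zip_mem_both hmem
    exact ⟨(hword_keys pr.1).mpr ⟨ws, hws, h1⟩, (hword_keys pr.2).mpr ⟨ws, hws, h2⟩⟩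
  set Ast := synonyms.foldl
    (fun st ws => (ws.zip ws.tail).foldl (fun st ab => ufUnion st.1 st.2 ab.1 ab.2) st)
    (p0, rk0) with hAstdef
  have hflat : Ast = (prsOf synonyms).foldl
      (fun st ab => ufUnion st.1 st.2 ab.1 ab.2) (p0, rk0) :=
    foldl_nested _ synonyms (p0, rk0)
  obtain ⟨hkeysU, hwfU, hEqU⟩ := eqR_foldPairs (prsOf synonyms) p0 rk0 hwf0 hprs
  rw [← hflat] at hkeysU hwfU hEqU
  obtain ⟨hwfS, hkeysS, hES, hcompS⟩ := compressed_of_fold hwfU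
  set pstar := Ast.1.keys.foldl (fun p i => (ufFind p.items.length p i).1) Ast.1 with hpstardef
  have hEqS : ∀ x y, EqR pstar x y ↔ EqR Ast.1 x y := fun x y =>
    ⟨fun ⟨r, h1, h2⟩ => ⟨r, (hES _ _).mp h1, (hES _ _).mp h2⟩,
     fun ⟨r, h1, h2⟩ => ⟨r, (hES _ _).mpr h1, (hES _ _).mpr h2⟩⟩
  have hEq0 : ∀ u v, EqR p0 u v ↔ u = v := by
    intro u v
    constructor
    · rintro ⟨r, h1, h2⟩
      exact (reaches_of_root (hpar0 u) h1).symm.trans (reaches_of_root (hpar0 v) h2)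
    · rintro rfl
      exact eqR_refl p0 hwf0.2.2 u
  have hConn : ∀ a b, EqR pstar a b ↔ Relation.EqvGen (EdgeIn (prsOf synonyms)) a b := by
    intro a b
    rw [hEqS a b, hEqU a b]
    constructor
    · apply eqvGen_mono_once
      rintro u v (h | h)
      · rw [hEq0 u v] at h
        subst h
        exact Relation.EqvGen.refl u
      · exact Relation.EqvGen.rel u v h
    · apply eqvGen_mono_once
      intro u v h
      exact Relation.EqvGen.rel u v (Or.inr h)
  obtain ⟨hadj1, hadj2⟩ := adj_spec synonyms
  have hpkeys : pstar.keys = p0.keys := hkeysS.trans hkeysU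
  have hcontains : ∀ u, (adjOf synonyms).contains u = true ↔ u ∈ pstar.keys := by
    intro u
    rw [hadj1 u, hpkeys]
    exact (hword_keys u).symm
  have hperm : ∀ x, (oA pstar x).Perm (oB (adjOf synonyms) x) := by
    intro x
    rw [oA, oB]
    by_cases hx : x ∈ pstar.keys
    · rw [if_pos hx, if_pos ((hcontains x).mpr hx)]
      obtain ⟨hcompnd, hcompmem⟩ := component_spec synonyms x (by
        rw [← PySem.Dict.contains_iff_mem_keys]
        exact (hcontains x).mpr hx)
      have hknd : pstar.keys.Nodup := by
        rw [hpkeys, hkeys0]; exact hwnd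
      rw [List.perm_ext_iff_of_nodup (List.Nodup.filter _ hknd) hcompnd]
      intro y
      rw [List.mem_filter, hcompmem y]
      constructor
      · rintro ⟨hy, he⟩
        have hp : ufPar pstar y = ufPar pstar x := by simpa using he
        exact Relation.EqvGen.symm _ _ ((hConn y x).mp ((eqR_iff_par hcompS y x).mpr hp))
      · intro h
        have hE : EqR pstar y x := (hConn y x).mpr (Relation.EqvGen.symm _ _ h)
        refine ⟨?_, by simpa using (eqR_iff_par hcompS y x).mp hE⟩
        rw [hpkeys, hword_keys y]
        exact (conn_word x y h).mp ((hword_keys x).mp (hpkeys ▸ hx))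
    · rw [if_neg hx, if_neg (fun h => hx ((hcontains x).mp h))]
  rw [generateSentences, generateSentences_alt]
  simp only [← hwordsdef, ← hp0def, ← hrk0def, ← hAstdef, ← hpstardef, htw, Option.getD_some]
  rw [textFold_spec tw pstar [] hwfS hcompS]
  rw [List.nil_append]
  obtain ⟨x0, twr, rfl⟩ : ∃ x0 twr, tw = x0 :: twr := by
    cases tw with
    | nil => exact absurd rfl htwne
    | cons a b => exact ⟨a, b, rfl⟩
  rw [List.map_cons, PySem.List.pyGetD_zero_cons, PySem.List.slice_from_one, List.tail_cons]
  have hA : (twr.map (oA pstar)).foldl (fun acc ws =>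
      acc.foldl (fun r a => ws.foldl (fun r b => r ++ [PySem.Str.join " " [a, b]]) r) [])
      (oA pstar x0)
      = ((twr.map (oA pstar)).foldl
          (fun acc ws => acc.flatMap (fun t => ws.map (fun w => t ++ [w])))
          ((oA pstar x0).map (fun w => [w]))).map (PySem.Str.join " ") := by
    rw [← singletons_map_join (oA pstar x0)]
    rw [sentFold_spec (twr.map (oA pstar)) ((oA pstar x0).map (fun w => [w]))
      (by intro t ht; rw [List.mem_map] at ht; obtain ⟨w, _, rfl⟩ := ht; simp)]
    rw [singletons_map_join]
  rw [hA]
  have hB : ((x0 :: twr).map (fun x => if (adjOf synonyms).contains x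
        then component (adjOf synonyms) x else [x])).foldl
        (fun acc ws => acc.flatMap (fun t => ws.map (fun w => t ++ [w]))) [[]]
      = (twr.map (oB (adjOf synonyms))).foldl
          (fun acc ws => acc.flatMap (fun t => ws.map (fun w => t ++ [w])))
          ((oB (adjOf synonyms) x0).map (fun w => [w])) := by
    rw [List.map_cons, List.foldl_cons]
    rw [show (fun x => if (adjOf synonyms).contains x = true
        then component (adjOf synonyms) x else [x]) = oB (adjOf synonyms) from rfl]
    rw [show (if (adjOf synonyms).contains x0 = true
        then component (adjOf synonyms) x0 else [x0]) = oB (adjOf synonyms) x0 from rfl]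
    simp
  rw [hB]
  rw [PySem.List.sorted_id_eq_sorted_id_iff_perm]
  refine List.Perm.map _ (tupProd_perm (forall₂_perm_map twr _ _ (fun x _ => hperm x)) _ _ ?_)
  exact (hperm x0).map _
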